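-- pv_equiv track=rewrite | github.com/soyukke/lean-unsolved | scripts/exploration_ck_closedform.py | compute_closed_form_mod3k
-- ===== SOURCE A (Python) =====
-- def compute_closed_form_mod3k(vs, k):
--     """
--     Compute T^k(n) mod 3^k from v2 sequence only.
--
--     T^k(n) mod 3^k = C_k * inv(2^{S_k}) mod 3^k
--     = sum_{i=1}^{k} 3^{k-i} * 2^{-S_i} mod 3^k
--     """
--     mod3k = 3**k
--     # S_i values
--     Ss = [0] * (k + 1)
--     for i in range(1, k + 1):
--         Ss[i] = Ss[i-1] + vs[i-1]
--
--     result = 0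
--     for i in range(1, k + 1):
--         # 2^{-S_i} mod 3^k
--         inv_2_Si = pow(2, -Ss[i], mod3k) if mod3k > 1 else 0
--         result += 3**(k - i) * inv_2_Si
--
--     return result % mod3k
-- ===== SOURCE B (Python) =====
-- def compute_closed_form_mod3k(vs, k):
--     """One pass: running 2^{-S_i} mod 3^k maintained incrementally, powers of 3 descending."""
--     mod = 3 ** k
--     if mod == 1:
--         return 0
--     inv2 = (mod + 1) // 2
--     c = 1
--     pow3 = mod // 3
--     result = 0
--     for v in vs[:k]:
--         c = c * (pow(inv2, v, mod) if v >= 0 else pow(2, -v, mod)) % mod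
--         result = (result + pow3 * c) % mod
--         pow3 //= 3
--     return result
-- ===== Notes on version B (the rewrite author's own statement) =====
-- stated objective: alternative
-- what changed: Single pass over vs maintaining a running modular product c = 2^{-S_i} mod 3^k (updated by one modular power of inv(2) or 2 per element) and a descending power of 3, instead of first materialising the prefix-sum array Ss and then computing pow(2, -S_i, 3^k) from scratch for each i; Pre_ excludes k < 0 (A returns a float, not an int) and k > len(vs) (A raises IndexError).
-- outside the precondition, e.g. on compute_closed_form_mod3k([], -1): A returns 0.0, B returns 0; on compute_closed_form_mod3k([0, 1], -1): A returns 0.0, B raises TypeError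
import Mathlib
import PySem

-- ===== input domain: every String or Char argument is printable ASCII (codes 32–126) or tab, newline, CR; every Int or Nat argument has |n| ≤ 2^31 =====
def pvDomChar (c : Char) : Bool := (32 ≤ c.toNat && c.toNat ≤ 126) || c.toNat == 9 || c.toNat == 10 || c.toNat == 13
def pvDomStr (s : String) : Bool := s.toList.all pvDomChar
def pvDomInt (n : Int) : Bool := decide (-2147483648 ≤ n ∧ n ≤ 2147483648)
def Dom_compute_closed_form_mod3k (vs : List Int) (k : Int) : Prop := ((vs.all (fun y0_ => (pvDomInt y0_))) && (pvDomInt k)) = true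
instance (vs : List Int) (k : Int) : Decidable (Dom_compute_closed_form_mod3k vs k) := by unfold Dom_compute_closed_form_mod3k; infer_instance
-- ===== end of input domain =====

-- B is a single pass maintaining a running 2^{-S_i} mod 3^k instead of A's prefix-sum array plus
-- a from-scratch modular power per term (objective: alternative; equivalence of the RETURN value).

-- ===== PORT A =====
-- pow(b, e, m) for a Nat exponent and m > 0: binary exponentiation reducing mod m at each
-- step, the value CPython's three-arg pow computes (PySem.Int.powMod is the same value but
-- evaluates b^e in full; pvPowModFast_eq below proves pvPowModFast b m e = b ^ e % m)
def pvPowModFast (b m : Int) : Nat → Int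
  | 0 => 1 % m
  | e + 1 =>
      let h := pvPowModFast b m ((e + 1) / 2)
      if (e + 1) % 2 = 0 then h * h % m else h * h % m * b % m
decreasing_by exact Nat.div_lt_self (by omega) (by omega)

-- three-arg pow(2, e, m) with Int exponent e: hand port, exact for odd m > 1
-- (there the modular inverse of 2 is (m+1)/2, and Python returns the unique representative in [0, m))
def pvPow2 (e m : Int) : Int :=
  if 0 ≤ e then pvPowModFast 2 m e.toNat else pvPowModFast ((m + 1) / 2) m (-e).toNat

-- the Ss array: Ss[0] = 0, Ss[i] = Ss[i-1] + vs[i-1]  (index in range under Pre_)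
def pvBuildSs (vs : List Int) : Nat → List Int
  | 0 => [0]
  | n + 1 =>
      let prev := pvBuildSs vs n
      prev ++ [prev.getLast! + vs.getD n 0]

def compute_closed_form_mod3k (vs : List Int) (k : Int) : Int :=
  let kn := k.toNat                 -- Pre_ gives 0 ≤ k
  let mod3k : Int := 3 ^ kn
  let Ss := pvBuildSs vs kn
  let result := (List.range kn).foldl
    (fun r i =>
      let inv := if 1 < mod3k then pvPow2 (-(Ss.getD (i + 1) 0)) mod3k else 0
      r + 3 ^ (kn - (i + 1)) * inv) 0
  result % mod3k                    -- mod3k > 0, so % is Python's mod here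

-- ===== PORT B =====
def pvStep (inv2 m : Int) (st : Int × Int × Int) (v : Int) : Int × Int × Int :=
  let c := (st.1 * (if 0 ≤ v then pvPowModFast inv2 m v.toNat
                    else pvPowModFast 2 m (-v).toNat)) % m
  (c, st.2.1 / 3, (st.2.2 + st.2.1 * c) % m)

def compute_closed_form_mod3k_alt (vs : List Int) (k : Int) : Int :=
  let m : Int := 3 ^ k.toNat
  if m = 1 then 0
  else ((vs.take k.toNat).foldl (pvStep ((m + 1) / 2) m) (1, m / 3, 0)).2.2

-- ===== PRECONDITION & SPEC =====
-- Pre_ excludes k < 0 (A returns a float, e.g. 0.0 on ([], -1), not an int) and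
-- k > len(vs) (A raises IndexError reading vs[i-1]).
def Pre_compute_closed_form_mod3k (vs : List Int) (k : Int) : Prop :=
  0 ≤ k ∧ k ≤ vs.length
instance (vs : List Int) (k : Int) : Decidable (Pre_compute_closed_form_mod3k vs k) := by
  unfold Pre_compute_closed_form_mod3k; infer_instance

def pvWitness_compute_closed_form_mod3k : List Int × Int := ([1, 2], 2)

def Spec_compute_closed_form_mod3k (vs : List Int) (k : Int) (out : Int) : Prop := out = compute_closed_form_mod3k_alt vs k
instance (vs : List Int) (k : Int) (out : Int) : Decidable (Spec_compute_closed_form_mod3k vs k out) := by unfold Spec_compute_closed_form_mod3k; infer_instance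

-- ===== CLAIM (what is proved, stated in full; the proofs are below) =====
def Claim_equal_compute_closed_form_mod3k : Prop := ∀ (vs : List Int) (k : Int), Dom_compute_closed_form_mod3k vs k → Pre_compute_closed_form_mod3k vs k → Spec_compute_closed_form_mod3k vs k (compute_closed_form_mod3k vs k)

-- ===== LEMMAS AND PROOFS =====

-- the common mathematical value both programs compute, recursively:
-- pvGsum m ws S e = Σ_j 3^(e-j) · (2^{-(S + ws₁ + … + ws_{j+1})} mod m)
def pvGsum (m : Int) : List Int → Int → Nat → Int
  | [], _, _ => 0
  | v :: rest, S, e => 3 ^ e * pvPow2 (-(S + v)) m + pvGsum m rest (S + v) (e - 1)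

theorem pvPowModFast_eq (b m : Int) : ∀ e : Nat, pvPowModFast b m e = b ^ e % m
  | 0 => by simp [pvPowModFast]
  | e + 1 => by
    rw [pvPowModFast, pvPowModFast_eq b m ((e + 1) / 2)]
    by_cases h : (e + 1) % 2 = 0
    · rw [if_pos h, ← Int.mul_emod, ← pow_add,
        show (e + 1) / 2 + (e + 1) / 2 = e + 1 by omega]
    · rw [if_neg h, ← Int.mul_emod]
      conv_lhs => rw [Int.mul_emod, Int.emod_emod_of_dvd _ dvd_rfl]
      rw [← Int.mul_emod, ← pow_add, ← pow_succ,
        show (e + 1) / 2 + (e + 1) / 2 + 1 = e + 1 by omega]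

theorem pv_two_mul_inv2 (m : Int) (hodd : Odd m) : 2 * ((m + 1) / 2) = m + 1 := by
  obtain ⟨t, ht⟩ := hodd
  exact Int.mul_ediv_cancel' ⟨t + 1, by omega⟩

theorem pv_inv2_modeq (m : Int) (hodd : Odd m) : 2 * ((m + 1) / 2) ≡ 1 [ZMOD m] := by
  rw [pv_two_mul_inv2 m hodd]
  calc (m + 1) % m = (m % m + 1 % m) % m := by rw [Int.add_emod]
    _ = 1 % m := by simp

theorem pv_pow2j (m : Int) (hodd : Odd m) (n : Nat) :
    (2 : Int) ^ n * ((m + 1) / 2) ^ n ≡ 1 [ZMOD m] := by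
  have := (pv_inv2_modeq m hodd).pow n
  simpa [mul_pow] using this

-- cancellation by a power of 2 (2 is invertible mod odd m)
theorem pv_cancel2 (m : Int) (hodd : Odd m) (n : Nat) {x y : Int}
    (h : 2 ^ n * x ≡ 2 ^ n * y [ZMOD m]) : x ≡ y [ZMOD m] := by
  have hj := pv_pow2j m hodd n
  calc x ≡ 2 ^ n * ((m + 1) / 2) ^ n * x [ZMOD m] := by
        have h0 := hj.symm.mul_right x
        rwa [one_mul] at h0
    _ = ((m + 1) / 2) ^ n * (2 ^ n * x) := by ring
    _ ≡ ((m + 1) / 2) ^ n * (2 ^ n * y) [ZMOD m] := h.mul_left _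
    _ = 2 ^ n * ((m + 1) / 2) ^ n * y := by ring
    _ ≡ 1 * y [ZMOD m] := hj.mul_right y
    _ = y := one_mul y

theorem pv_char (m : Int) (hodd : Odd m) (e : Int) :
    2 ^ (-e).toNat * pvPow2 e m ≡ 2 ^ e.toNat [ZMOD m] := by
  unfold pvPow2
  split_ifs with h
  · rw [pvPowModFast_eq, show (-e).toNat = 0 by omega, pow_zero, one_mul]
    exact Int.mod_modEq _ m
  · rw [pvPowModFast_eq, show e.toNat = 0 by omega, pow_zero]
    calc 2 ^ (-e).toNat * (((m + 1) / 2) ^ (-e).toNat % m)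
        ≡ 2 ^ (-e).toNat * ((m + 1) / 2) ^ (-e).toNat [ZMOD m] := (Int.mod_modEq _ m).mul_left _
      _ ≡ 1 [ZMOD m] := pv_pow2j m hodd _

theorem pvPow2_mul (m : Int) (hodd : Odd m) (a b : Int) :
    pvPow2 a m * pvPow2 b m ≡ pvPow2 (a + b) m [ZMOD m] := by
  have hL : 2 ^ ((-a).toNat + (-b).toNat) * (pvPow2 a m * pvPow2 b m) ≡
      2 ^ (a.toNat + b.toNat) [ZMOD m] := by
    calc 2 ^ ((-a).toNat + (-b).toNat) * (pvPow2 a m * pvPow2 b m)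
        = (2 ^ (-a).toNat * pvPow2 a m) * (2 ^ (-b).toNat * pvPow2 b m) := by
          rw [pow_add]; ring
      _ ≡ 2 ^ a.toNat * 2 ^ b.toNat [ZMOD m] :=
          (pv_char m hodd a).mul (pv_char m hodd b)
      _ = 2 ^ (a.toNat + b.toNat) := (pow_add 2 _ _).symm
  have hR : 2 ^ ((-a).toNat + (-b).toNat) * pvPow2 (a + b) m ≡
      2 ^ (a.toNat + b.toNat) [ZMOD m] := by
    have hX : (-a).toNat + (-b).toNat =
        ((-a).toNat + (-b).toNat - (-(a + b)).toNat) + (-(a + b)).toNat := by omega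
    calc 2 ^ ((-a).toNat + (-b).toNat) * pvPow2 (a + b) m
        = 2 ^ ((-a).toNat + (-b).toNat - (-(a + b)).toNat) *
            (2 ^ (-(a + b)).toNat * pvPow2 (a + b) m) := by
          rw [← mul_assoc, ← pow_add, ← hX]
      _ ≡ 2 ^ ((-a).toNat + (-b).toNat - (-(a + b)).toNat) * 2 ^ (a + b).toNat [ZMOD m] :=
          (pv_char m hodd (a + b)).mul_left _
      _ = 2 ^ (((-a).toNat + (-b).toNat - (-(a + b)).toNat) + (a + b).toNat) :=
          (pow_add 2 _ _).symm
      _ = 2 ^ (a.toNat + b.toNat) := by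
          congr 1
          omega
  exact pv_cancel2 m hodd _ (hL.trans hR.symm)

theorem pvPow2_self_mod (e m : Int) : pvPow2 e m % m = pvPow2 e m := by
  unfold pvPow2
  split_ifs <;> rw [pvPowModFast_eq] <;> exact Int.emod_emod_of_dvd _ dvd_rfl

-- B's per-element modular factor is exactly pvPow2 (-v) m
theorem pv_step_factor (v m : Int) :
    (if 0 ≤ v then pvPowModFast ((m + 1) / 2) m v.toNat
     else pvPowModFast 2 m (-v).toNat) = pvPow2 (-v) m := by
  unfold pvPow2
  rcases lt_trichotomy v 0 with h | h | h
  · rw [if_neg (by omega), if_pos (by omega)]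
  · subst h; norm_num [pvPowModFast]
  · rw [if_pos (by omega), if_neg (by omega)]
    simp

-- B's fold computes r + pvGsum, reduced mod m
theorem pv_foldB (m : Int) (hm : 1 < m) (hodd : Odd m) :
    ∀ (ws : List Int) (S r : Int) (e : Nat), ws.length ≤ e + 1 → r % m = r →
      (ws.foldl (pvStep ((m + 1) / 2) m) (pvPow2 (-S) m, 3 ^ e, r)).2.2 =
        (r + pvGsum m ws S e) % m
  | [], S, r, e, _, hr => by simp [pvGsum, hr]
  | v :: rest, S, r, e, hlen, hr => by
    have hm0 : (0:Int) < m := by omega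
    have hc' : (pvPow2 (-S) m *
        (if 0 ≤ v then pvPowModFast ((m + 1) / 2) m v.toNat
         else pvPowModFast 2 m (-v).toNat)) % m = pvPow2 (-(S + v)) m := by
      rw [pv_step_factor v m]
      have h2 := (pvPow2_mul m hodd (-S) (-v)).trans
        (by rw [show -S + -v = -(S + v) by ring] : pvPow2 (-S + -v) m ≡ pvPow2 (-(S+v)) m [ZMOD m])
      calc (pvPow2 (-S) m * pvPow2 (-v) m) % m
          = pvPow2 (-(S + v)) m % m := h2
        _ = pvPow2 (-(S + v)) m := pvPow2_self_mod _ m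
    cases e with
    | zero =>
      have : rest = [] := by
        cases rest with
        | nil => rfl
        | cons a l => simp at hlen
      subst this
      simp only [List.foldl_cons, List.foldl_nil, pvStep, pvGsum]
      rw [hc']
      ring_nf
    | succ e' =>
      have hstep : pvStep ((m + 1) / 2) m (pvPow2 (-S) m, 3 ^ (e' + 1), r) v =
          (pvPow2 (-(S + v)) m, 3 ^ e', (r + 3 ^ (e' + 1) * pvPow2 (-(S + v)) m) % m) := by
        simp only [pvStep, hc']
        refine Prod.ext rfl (Prod.ext ?_ rfl)
        show (3:Int) ^ (e' + 1) / 3 = 3 ^ e'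
        rw [pow_succ, mul_comm]
        exact Int.mul_ediv_cancel_left _ (by norm_num)
      rw [List.foldl_cons, hstep,
        pv_foldB m hm hodd rest (S + v) _ e' (by simpa using hlen)
          (Int.emod_emod_of_dvd _ dvd_rfl)]
      simp only [pvGsum, Nat.add_sub_cancel]
      rw [Int.add_emod ((r + 3 ^ (e' + 1) * pvPow2 (-(S + v)) m) % m), Int.emod_emod_of_dvd _ dvd_rfl,
        ← Int.add_emod]
      ring_nf

-- pvGsum as an indexed sum (the shape A produces)
theorem pvGsum_spec (m : Int) :
    ∀ (ws : List Int) (S : Int) (e : Nat), ws.length ≤ e + 1 →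
      pvGsum m ws S e =
        ((List.range ws.length).map
          (fun j => 3 ^ (e - j) * pvPow2 (-(S + (ws.take (j + 1)).sum)) m)).sum
  | [], _, _, _ => by simp [pvGsum]
  | v :: rest, S, e, hlen => by
    rw [show (v :: rest).length = rest.length + 1 from rfl, List.range_succ_eq_map]
    simp only [List.map_cons, List.map_map, List.sum_cons]
    simp only [pvGsum]
    congr 1
    · simp
    · rw [pvGsum_spec m rest (S + v) (e - 1) (by simp at hlen; omega)]
      congr 1
      apply List.map_congr_left
      intro j hj
      simp only [Function.comp_apply, List.take_succ_cons, List.sum_cons]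
      congr 2
      · omega
      · simp only [Nat.succ_eq_add_one]; ring
-- termination for the mutual-looking recursion above is structural on ws

-- A's Ss array is the prefix-sum table
theorem pvBuildSs_eq (vs : List Int) :
    ∀ n : Nat, n ≤ vs.length →
      pvBuildSs vs n = (List.range (n + 1)).map (fun t => (vs.take t).sum)
  | 0, _ => by simp [pvBuildSs]
  | n + 1, h => by
    rw [pvBuildSs, pvBuildSs_eq vs n (by omega)]
    rw [List.range_succ (n := n + 1), List.map_append]
    congr 1
    have hlast : ((List.range (n + 1)).map (fun t => (vs.take t).sum)).getLast! = (vs.take n).sum := by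
      rw [List.range_succ, List.map_append]
      generalize (List.range n).map (fun t => (vs.take t).sum) = l
      cases l with
      | nil => rfl
      | cons x xs => simp [List.getLast!]
    rw [hlast]
    simp only [List.map_cons, List.map_nil, List.cons.injEq, and_true]
    rw [List.take_add_one, List.sum_append]
    have : vs[n]? = some (vs.getD n 0) := by
      rw [List.getElem?_eq_getElem (show n < vs.length by omega)]
      simp [List.getD_eq_getElem?_getD, List.getElem?_eq_getElem (show n < vs.length by omega)]
    rw [this]
    simp

theorem pv_getD_map_range (f : Nat → Int) (n i : Nat) (h : i < n) :
    ((List.range n).map f).getD i 0 = f i := by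
  rw [List.getD_eq_getElem?_getD]
  simp [h]

-- ===== VERDICT (by name: the statement is the Claim_ definition above) =====
theorem compute_closed_form_mod3k_spec : Claim_equal_compute_closed_form_mod3k := by
  intro vs k _ hpre
  obtain ⟨hk0, hkle⟩ := hpre
  unfold Spec_compute_closed_form_mod3k
  unfold compute_closed_form_mod3k compute_closed_form_mod3k_alt
  cases hn : k.toNat with
  | zero => simp
  | succ n =>
    have hlen : n + 1 ≤ vs.length := by omega
    set m : Int := 3 ^ (n + 1) with hm
    have hm1 : (1:Int) < m := by
      rw [hm]; calc (1:Int) < 3 ^ 1 := by norm_num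
        _ ≤ 3 ^ (n + 1) := pow_le_pow_right₀ (by norm_num) (by omega)
    have hm0 : (0:Int) < m := by omega
    have hodd : Odd m := Odd.pow ⟨1, by norm_num⟩
    simp only [if_neg (by omega : ¬ m = 1)]
    -- B side
    have hP0 : pvPow2 (-(0:Int)) m = 1 := by
      unfold pvPow2
      rw [if_pos (by norm_num), pvPowModFast_eq]
      simpa using Int.emod_eq_of_lt (by norm_num) hm1
    have hdiv : m / 3 = (3:Int) ^ n := by
      rw [hm, pow_succ, mul_comm]; exact Int.mul_ediv_cancel_left _ (by norm_num)
    have hB := pv_foldB m hm1 hodd (vs.take (n + 1)) 0 0 n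
      (by rw [List.length_take]; omega) (by simp)
    rw [hP0] at hB
    rw [hdiv, hB]
    -- A side
    have hA : (List.range (n + 1)).foldl
        (fun r i =>
          r + 3 ^ (n + 1 - (i + 1)) *
            (if 1 < m then pvPow2 (-((pvBuildSs vs (n + 1)).getD (i + 1) 0)) m else 0)) 0 =
        pvGsum m (vs.take (n + 1)) 0 n := by
      rw [PySem.List.foldl_add]
      rw [pvGsum_spec m (vs.take (n + 1)) 0 n (by rw [List.length_take]; omega)]
      have hlt : (vs.take (n + 1)).length = n + 1 := by rw [List.length_take]; omega
      rw [hlt]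
      simp only [zero_add]
      apply congrArg
      apply List.map_congr_left
      intro j hj
      have hj' : j < n + 1 := List.mem_range.mp hj
      rw [if_pos hm1, pvBuildSs_eq vs (n + 1) hlen,
        pv_getD_map_range _ (n + 1 + 1) (j + 1) (by omega)]
      rw [List.take_take, min_eq_left (by omega : j + 1 ≤ n + 1)]
      congr 2
      omega
    rw [hA, ← hm]
    simp
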